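-- pv_equiv track=rewrite | github.com/jihyuno0o/studyAlgorithm | 프로그래머스/lv2/42586. 기능개발/기능개발.py | solution
-- ===== SOURCE A (Python) =====
-- def solution(progresses, speeds):
--     import math
--     answer = []
--     days = {}
--     before = 0
--     for progress, speed in zip(progresses, speeds):
--         day = int(math.ceil((100-progress) / speed)) # 소수점도 하루로 침
--         if before >= day: day = before # 앞의 기능이 완료되지 않으면 뒤 기능이 배포 안됨
--         else: before = day
--
--         if day in days:
--             days[day] = days[day] + 1
--         else: days[day] = 1
--
--     for k,v in days.items():
--         answer.append(v)
--     return answer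
-- ===== SOURCE B (Python) =====
-- def solution(progresses, speeds):
--     from collections import deque
--     # remaining days per feature; a feature at/past 100% needs 0 more days
--     q = deque(max(0, -((p - 100) // s)) for p, s in zip(progresses, speeds))
--     answer = []
--     while q:
--         day = q.popleft()          # batch leader: its day gates the whole batch
--         count = 1
--         while q and q[0] <= day:   # consume every feature finishing by the leader's day
--             q.popleft()
--             count += 1
--         answer.append(count)
--     return answer
-- ===== Notes on version B (the rewrite author's own statement) =====
-- stated objective: alternative
-- what changed: Replaces the fused running-max + day-keyed dict tally with a work-queue simulation: precompute each feature's remaining days (integer ceiling, a finished feature needs 0 days), then repeatedly pop a batch leader from the queue and consume every queued feature finishing by the leader's day, emitting each batch size.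
import Mathlib
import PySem

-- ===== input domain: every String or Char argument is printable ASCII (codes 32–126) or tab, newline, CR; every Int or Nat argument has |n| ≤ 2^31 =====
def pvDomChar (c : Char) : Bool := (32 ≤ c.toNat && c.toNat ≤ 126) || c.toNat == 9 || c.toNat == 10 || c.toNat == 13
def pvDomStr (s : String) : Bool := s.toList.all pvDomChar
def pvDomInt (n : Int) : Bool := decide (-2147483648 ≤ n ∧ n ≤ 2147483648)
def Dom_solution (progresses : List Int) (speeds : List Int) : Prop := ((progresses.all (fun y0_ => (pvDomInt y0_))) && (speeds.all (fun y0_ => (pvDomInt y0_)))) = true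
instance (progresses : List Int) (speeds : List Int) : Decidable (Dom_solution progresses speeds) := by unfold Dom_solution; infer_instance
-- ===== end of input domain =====

-- B replaces A's fused dict-tally loop (running max + day-keyed counter) by a work-queue
-- simulation: precompute remaining days, then pop a batch leader and consume every queued
-- feature finishing by the leader's day; same O(n) cost, different algorithm shape.

-- ===== PORT A =====
-- int(math.ceil((100-progress)/speed)) : exact integer ceiling; equal to the float
-- computation on Dom (|arguments| ≤ 2^31+100 ≪ 2^53, so the float quotient cannot
-- cross an integer before ceil).
def pyCeilA (progress speed : Int) : Int := -(PySem.Int.floordiv (-(100 - progress)) speed)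

-- the for-loop of A: state = (days dict, before)
def loopA : List (Int × Int) → PySem.Dict Int Int → Int → PySem.Dict Int Int
  | [], days, _ => days
  | (progress, speed) :: rest, days, before =>
      let day0 := pyCeilA progress speed
      let day := if before ≥ day0 then before else day0
      let before' := if before ≥ day0 then before else day0
      let days' := match days.get? day with
        | some v => days.insert day (v + 1)
        | none => days.insert day 1
      loopA rest days' before'

def solution (progresses : List Int) (speeds : List Int) : List Int :=
  -- for k,v in days.items(): answer.append(v)
  (loopA (progresses.zip speeds) PySem.Dict.empty 0).values

-- ===== PORT B =====
-- max(0, -((p - 100) // s)) : remaining days (exact integer ceiling; 0 if already done)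
def bDay (p s : Int) : Int := max 0 (-(PySem.Int.floordiv (p - 100) s))

-- inner while: pop every queued day ≤ the leader's day, counting
def bPop (day : Int) : List Int → Int → Int × List Int
  | [], count => (count, [])
  | x :: r, count => if x ≤ day then bPop day r (count + 1) else (count, x :: r)

lemma bPop_len (day : Int) : ∀ (l : List Int) (c : Int), (bPop day l c).2.length ≤ l.length := by
  intro l
  induction l with
  | nil => intro c; simp [bPop]
  | cons x r ih =>
      intro c
      by_cases h : x ≤ day
      · simp only [bPop, if_pos h]
        exact (ih (c + 1)).trans (Nat.le_succ _)
      · simp [bPop, if_neg h]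

-- outer while: pop the leader, consume its batch, append the batch size
def bLoop : List Int → List Int
  | [] => []
  | day :: q =>
      let pr := bPop day q 1
      pr.1 :: bLoop pr.2
  termination_by l => l.length
  decreasing_by simp only [List.length_cons]; exact Nat.lt_succ_of_le (bPop_len day q 1)

def solution_alt (progresses : List Int) (speeds : List Int) : List Int :=
  bLoop ((progresses.zip speeds).map (fun ps => bDay ps.1 ps.2))

-- ===== PRECONDITION & SPEC =====
-- Pre_ excludes exactly the inputs where Python A raises ZeroDivisionError: a zero
-- speed among the zipped pairs.
def Pre_solution (progresses : List Int) (speeds : List Int) : Prop :=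
  ∀ ps ∈ progresses.zip speeds, ps.2 ≠ 0
instance (progresses : List Int) (speeds : List Int) : Decidable (Pre_solution progresses speeds) := by unfold Pre_solution; infer_instance

def pvWitness_solution : List Int × List Int := ([93, 30, 55], [1, 30, 5])

def Spec_solution (progresses : List Int) (speeds : List Int) (out : List Int) : Prop := out = solution_alt progresses speeds
instance (progresses : List Int) (speeds : List Int) (out : List Int) : Decidable (Spec_solution progresses speeds out) := by unfold Spec_solution; infer_instance

-- ===== CLAIM (what is proved, stated in full; the proofs are below) =====
def Claim_equal_solution : Prop := ∀ (progresses : List Int) (speeds : List Int), Dom_solution progresses speeds → Pre_solution progresses speeds → Spec_solution progresses speeds (solution progresses speeds)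

-- ===== LEMMAS AND PROOFS =====

-- A's raw ceil day (proof helper; loopA's day0 before the running-max clamp)
def bCeil (p s : Int) : Int := -(PySem.Int.floordiv (p - 100) s)

-- the effective-day sequence of A, as a standalone recursion over pairs
def effList : List (Int × Int) → Int → List Int
  | [], _ => []
  | (p, s) :: r, b => let h := max b (bCeil p s); h :: effList r h

-- the same running-max scan over a plain day list
def effD : List Int → Int → List Int
  | [], _ => []
  | d :: r, b => let h := max b d; h :: effD r h

-- run-length-encoding step used to characterise A's ordered dict values
def bIncLast (l : List Int) : List Int := l.dropLast ++ [(l.getLast?.getD 0) + 1]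
def bRleStep (st : List Int × Option Int) (d : Int) : List Int × Option Int :=
  if some d == st.2 then (bIncLast st.1, st.2) else (st.1 ++ [1], some d)

lemma map_update_last {w : Int} : ∀ {its : List (Int × Int)} {h : Int},
    ((its.map Prod.fst).Nodup) → (its.map Prod.fst).getLast? = some h →
    its.map (fun p => if p.1 == h then (h, w) else p) = its.dropLast ++ [(h, w)] := by
  intro its
  induction its with
  | nil => intro h _ hl; simp at hl
  | cons x r ih =>
      intro h hnd hl
      cases r with
      | nil =>
          simp at hl
          subst hl
          simp
      | cons y r' =>
          have hl' : ((y :: r').map Prod.fst).getLast? = some h := by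
            simpa [List.getLast?_cons_cons] using hl
          have hmem : h ∈ (y :: r').map Prod.fst := List.mem_of_getLast? hl'
          have hnd2 : x.1 ∉ (y :: r').map Prod.fst ∧ ((y :: r').map Prod.fst).Nodup :=
            List.nodup_cons.mp (by simpa using hnd)
          have hx : x.1 ≠ h := fun he => hnd2.1 (he ▸ hmem)
          have := ih hnd2.2 hl'
          simp only [List.map_cons] at this ⊢
          rw [this]
          simp [hx]

lemma values_getLast {d : PySem.Dict Int Int} {h v : Int} (hnd : d.keys.Nodup)
    (hlast : d.keys.getLast? = some h) (hget : d.get? h = some v) :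
    d.values.getLast? = some v := by
  obtain ⟨its⟩ := d
  have hk : (its.map Prod.fst).getLast? = some h := hlast
  rw [List.getLast?_map] at hk
  cases hp : its.getLast? with
  | none => rw [hp] at hk; simp at hk
  | some p =>
      rw [hp] at hk
      have hp1 : p.1 = h := by simpa using hk
      have hmem : p ∈ its := List.mem_of_getLast? hp
      have h2 : (PySem.Dict.mk its).get? p.1 = some p.2 :=
        PySem.Dict.get?_of_mem_items _ (by simpa using hmem) hnd
      rw [hp1, hget] at h2
      have hv : v = p.2 := by simpa using h2
      show (its.map Prod.snd).getLast? = some v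
      rw [List.getLast?_map, hp, hv]
      rfl

lemma values_insert_last {d : PySem.Dict Int Int} {h w : Int} (hnd : d.keys.Nodup)
    (hlast : d.keys.getLast? = some h) :
    (d.insert h w).values = d.values.dropLast ++ [w] := by
  have hmem : h ∈ d.keys := List.mem_of_getLast? hlast
  have hc : d.contains h = true := (PySem.Dict.contains_iff_mem_keys d h).mpr hmem
  obtain ⟨its⟩ := d
  have hitems := PySem.Dict.items_insert_of_contains (PySem.Dict.mk its) (v := w) hc
  show ((PySem.Dict.mk its).insert h w).items.map Prod.snd = _
  rw [hitems]
  show (its.map _).map Prod.snd = (its.map Prod.snd).dropLast ++ [w]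
  rw [map_update_last hnd hlast]
  simp [← List.map_dropLast]

lemma keys_insert_last {d : PySem.Dict Int Int} {h w : Int}
    (hlast : d.keys.getLast? = some h) : (d.insert h w).keys = d.keys :=
  PySem.Dict.keys_insert_of_contains d w
    ((PySem.Dict.contains_iff_mem_keys d h).mpr (List.mem_of_getLast? hlast))

lemma values_insert_fresh {d : PySem.Dict Int Int} {k w : Int} (hc : d.contains k = false) :
    (d.insert k w).values = d.values ++ [w] := by
  show (d.insert k w).items.map Prod.snd = _
  rw [PySem.Dict.items_insert_of_not_contains d w hc]
  simp [PySem.Dict.values]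

lemma ceilA_eq (p s : Int) : pyCeilA p s = bCeil p s := by
  unfold pyCeilA bCeil; rw [show -(100 - p) = p - 100 by ring]
lemma if_max (b d : Int) : (if b ≥ d then b else d) = max b d := by omega

lemma getLast?_eq_of_mem_of_forall_le {h : Int} :
    ∀ {l : List Int}, l.Pairwise (· < ·) → h ∈ l → (∀ k ∈ l, k ≤ h) → l.getLast? = some h := by
  intro l
  induction l with
  | nil => intro _ hm _; cases hm
  | cons x t ih =>
      intro hp hm hle
      cases t with
      | nil =>
          rcases List.mem_cons.mp hm with hm | hm
          · simp [hm]
          · cases hm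
      | cons y t' =>
          have hp' : (y :: t').Pairwise (· < ·) := hp.of_cons
          rcases List.mem_cons.mp hm with rfl | hm'
          · have hxy : h < y := (List.pairwise_cons.mp hp).1 y (by simp)
            have : y ≤ h := hle y (by simp)
            omega
          · have := ih hp' hm' (fun k hk => hle k (List.mem_cons_of_mem _ hk))
            simpa [List.getLast?_cons_cons] using this

lemma loopA_eq : ∀ (l : List (Int × Int)) (d : PySem.Dict Int Int) (before : Int)
    (ans : List Int) (prev : Option Int),
    d.values = ans → d.keys.getLast? = prev → (∀ k ∈ d.keys, k ≤ before) →
    d.keys.Pairwise (· < ·) →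
    (loopA l d before).values = (List.foldl bRleStep (ans, prev) (effList l before)).1 := by
  intro l
  induction l with
  | nil => intro d before ans prev hv _ _ _; simpa [loopA, effList] using hv
  | cons x r ih =>
      intro d before ans prev hv hlastinv hball hpair
      obtain ⟨p, s⟩ := x
      have hnd : d.keys.Nodup := hpair.nodup
      rw [show effList ((p, s) :: r) before = max before (bCeil p s) :: effList r (max before (bCeil p s)) from rfl]
      set h := max before (bCeil p s) with hh
      have hstep : loopA ((p, s) :: r) d before =
          loopA r (match d.get? h with
            | some v => d.insert h (v + 1)
            | none => d.insert h 1) h := by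
        simp only [loopA, ceilA_eq, if_max, ← hh]
      rw [hstep, List.foldl_cons]
      have hbh : before ≤ h := le_max_left _ _
      cases hc : d.get? h with
      | some v =>
          have hmem : h ∈ d.keys := by
            by_contra hnm
            rw [(PySem.Dict.get?_eq_none_iff_not_mem_keys d h).mpr hnm] at hc
            cases hc
          have hlast2 : d.keys.getLast? = some h :=
            getLast?_eq_of_mem_of_forall_le hpair hmem (fun k hk => (hball k hk).trans hbh)
          have hprev : prev = some h := hlastinv ▸ hlast2
          have hrle : bRleStep (ans, prev) h = (bIncLast ans, prev) := by
            simp [bRleStep, hprev]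
          rw [hrle]
          apply ih (d.insert h (v + 1)) h (bIncLast ans) prev
          · rw [values_insert_last hnd hlast2, bIncLast, hv]
            have := values_getLast hnd hlast2 hc
            rw [hv] at this
            rw [this]
            rfl
          · rw [keys_insert_last hlast2, hlast2, hprev]
          · intro k hk
            rw [keys_insert_last hlast2] at hk
            exact (hball k hk).trans hbh
          · rw [keys_insert_last hlast2]; exact hpair
      | none =>
          have hnm : h ∉ d.keys := (PySem.Dict.get?_eq_none_iff_not_mem_keys d h).mp hc
          have hcf : d.contains h = false := by
            cases hcc : d.contains h
            · rfl
            · exact absurd ((PySem.Dict.contains_iff_mem_keys d h).mp hcc) hnm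
          have hprev : (some h == prev) = false := by
            cases hp : prev with
            | none => rfl
            | some k =>
                have hkmem : k ∈ d.keys := List.mem_of_getLast? (hp ▸ hlastinv)
                have : h ≠ k := fun he => hnm (he ▸ hkmem)
                simpa using this
          have hrle : bRleStep (ans, prev) h = (ans ++ [1], some h) := by
            simp [bRleStep, hprev]
          rw [hrle]
          apply ih (d.insert h 1) h (ans ++ [1]) (some h)
          · rw [values_insert_fresh hcf, hv]
          · rw [PySem.Dict.keys_insert_of_not_contains d 1 hcf, List.getLast?_concat]
          · intro k hk
            rw [PySem.Dict.keys_insert_of_not_contains d 1 hcf] at hk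
            rcases List.mem_append.mp hk with hk | hk
            · exact (hball k hk).trans hbh
            · simpa using List.mem_singleton.mp hk ▸ le_refl h
          · rw [PySem.Dict.keys_insert_of_not_contains d 1 hcf]
            refine List.pairwise_append.mpr ⟨hpair, List.pairwise_singleton _ _, ?_⟩
            intro a ha b hb
            rw [List.mem_singleton.mp hb]
            have h1 : a ≤ before := hball a ha
            have h2 : a ≠ h := fun he => hnm (he ▸ ha)
            omega

lemma effList_effD : ∀ (l : List (Int × Int)) (b : Int),
    effList l b = effD (l.map (fun ps => bCeil ps.1 ps.2)) b := by
  intro l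
  induction l with
  | nil => intro b; rfl
  | cons x r ih => obtain ⟨p, s⟩ := x; intro b; simp [effList, effD, ih]

lemma effD_clamp : ∀ (ds : List Int) (b : Int), 0 ≤ b →
    effD ds b = effD (ds.map (fun d => max 0 d)) b := by
  intro ds
  induction ds with
  | nil => intro b _; rfl
  | cons d r ih =>
      intro b hb
      have h1 : max b d = max b (max 0 d) := by omega
      simp only [List.map_cons, effD, h1]
      rw [ih _ (by omega)]

lemma bIncLast_concat (pre : List Int) (k : Int) : bIncLast (pre ++ [k]) = pre ++ [k + 1] := by
  simp [bIncLast]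

-- unfolding equations for the well-founded recursion bLoop
lemma bLoop_nil : bLoop [] = [] := by rw [bLoop]
lemma bLoop_cons (day : Int) (q : List Int) :
    bLoop (day :: q) = (bPop day q 1).1 :: bLoop (bPop day q 1).2 := by rw [bLoop]

lemma rle_run : ∀ (cs pre : List Int) (k h : Int),
    (List.foldl bRleStep (pre ++ [k], some h) (effD cs h)).1
      = pre ++ (bPop h cs k).1 :: bLoop (bPop h cs k).2 := by
  intro cs
  induction cs with
  | nil => intro pre k h; simp [effD, bPop, bLoop_nil]
  | cons c r ih =>
      intro pre k h
      by_cases hch : c ≤ h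
      · have hm : max h c = h := by omega
        rw [show effD (c :: r) h = max h c :: effD r (max h c) from rfl, hm, List.foldl_cons,
          show bRleStep (pre ++ [k], some h) h = (pre ++ [k + 1], some h) from by
            simp [bRleStep, bIncLast_concat],
          show bPop h (c :: r) k = bPop h r (k + 1) from by simp [bPop, hch]]
        exact ih pre (k + 1) h
      · have hm : max h c = c := by omega
        have hcne : (some c == some h) = false := by simp; omega
        rw [show effD (c :: r) h = max h c :: effD r (max h c) from rfl, hm, List.foldl_cons,
          show bRleStep (pre ++ [k], some h) c = ((pre ++ [k]) ++ [1], some c) from by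
            simp [bRleStep, hcne],
          ih (pre ++ [k]) 1 c,
          show bPop h (c :: r) k = (k, c :: r) from by simp [bPop, hch],
          bLoop_cons]
        simp

-- ===== VERDICT (by name: the statement is the Claim_ definition above) =====
theorem solution_spec : Claim_equal_solution := by
  intro progresses speeds _ _
  unfold Spec_solution solution solution_alt
  rw [loopA_eq _ _ _ _ _ rfl rfl (by simp [PySem.Dict.keys_empty]) (by simp [PySem.Dict.keys_empty]),
    show (PySem.Dict.empty : PySem.Dict Int Int).values = ([] : List Int) from rfl,
    show (PySem.Dict.empty : PySem.Dict Int Int).keys.getLast? = (none : Option Int) from rfl]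
  cases progresses.zip speeds with
  | nil => simp [effList, bLoop_nil]
  | cons x r =>
      obtain ⟨p, s⟩ := x
      have hmap : (r.map (fun ps => bCeil ps.1 ps.2)).map (fun d => max 0 d)
          = r.map (fun ps => bDay ps.1 ps.2) := by
        simp [List.map_map, bDay, bCeil, Function.comp]
      have hr := rle_run (r.map (fun ps => bDay ps.1 ps.2)) [] 1 (max 0 (bCeil p s))
      rw [List.nil_append] at hr
      rw [show effList ((p, s) :: r) 0 = max 0 (bCeil p s) :: effList r (max 0 (bCeil p s)) from rfl,
        List.foldl_cons,
        show bRleStep ([], none) (max 0 (bCeil p s)) = ([1], some (max 0 (bCeil p s))) from by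
          simp [bRleStep],
        effList_effD, effD_clamp _ _ (le_max_left 0 _), hmap, hr, List.map_cons, bLoop_cons]
      simp [bDay, bCeil]
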